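-- pv_equiv track=rewrite | github.com/SayakaSuzuki47/LLM_Coq | make_data/make_conversational_style.py | process_lv_l
-- ===== SOURCE A (Python) =====
-- def process_lv_l(lv_first,lv_lst,l_first,l_lst,text_lst,texts,flag):
--     if (len(l_lst)==0)and(lv_first==l_first):
--         if flag:
--             text_lst.append(texts+lv_first)
--             text_lst.append('##Assistant'+'\n'+ ''.join(lv_lst))
--         else:
--             text_lst.append(texts)
--             text_lst.append(lv_first)
--             text_lst.append('##Assistant'+'\n'+ ''.join(lv_lst))
--         return(text_lst)
--     elif "Show." in lv_first:
--         lv_first=lv_first.replace('Show.','##User')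
--         text_lst.append(texts)
--         text_lst.append(lv_first)
--         texts=''
--         lv_first,lv_lst=lv_lst[0],lv_lst[1:]
--         return process_lv_l(lv_first,lv_lst,l_first,l_lst,text_lst,texts,flag)
--     elif lv_first==l_first:
--         if flag:
--             texts=texts+lv_first
--         else:
--             text_lst.append(texts)
--             texts=lv_first
--             flag=True
--         lv_first,lv_lst=lv_lst[0],lv_lst[1:]
--         l_first,l_lst=l_lst[0],l_lst[1:]
--         return process_lv_l(lv_first,lv_lst,l_first,l_lst,text_lst,texts,flag)
--     elif lv_first!=l_first:
--         if flag:
--             text_lst.append(texts)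
--             texts='##Assistant'+'\n'+lv_first
--             flag=False
--         else:
--             texts=texts+lv_first
--         lv_first,lv_lst=lv_lst[0],lv_lst[1:]
--         return process_lv_l(lv_first,lv_lst,l_first,l_lst,text_lst,texts,flag)
--     else:
--         raise ValueError("An exception occurred")
-- ===== SOURCE B (Python) =====
-- def process_lv_l(lv_first, lv_lst, l_first, l_lst, text_lst, texts, flag):
--     # Iterative reformulation: one while-loop, branch work factored into a
--     # state update, the lv-head advance and the '##Assistant' append shared.
--     while True:
--         if len(l_lst) == 0 and lv_first == l_first:
--             if flag:
--                 text_lst.append(texts + lv_first)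
--             else:
--                 text_lst.append(texts)
--                 text_lst.append(lv_first)
--             text_lst.append('##Assistant\n' + ''.join(lv_lst))
--             return text_lst
--         if 'Show.' in lv_first:
--             text_lst.append(texts)
--             text_lst.append(lv_first.replace('Show.', '##User'))
--             texts = ''
--         elif lv_first == l_first:
--             if flag:
--                 texts = texts + lv_first
--             else:
--                 text_lst.append(texts)
--                 texts = lv_first
--                 flag = True
--             l_first, l_lst = l_lst[0], l_lst[1:]
--         else:
--             if flag:
--                 text_lst.append(texts)
--                 texts = '##Assistant\n' + lv_first
--                 flag = False
--             else:
--                 texts = texts + lv_first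
--         lv_first, lv_lst = lv_lst[0], lv_lst[1:]
-- ===== Notes on version B (the rewrite author's own statement) =====
-- stated objective: simpler
-- what changed: The tail recursion is replaced by a single while-True loop over the same state; the shared lv-head advance and the '##Assistant' append are factored out of the branches, removing the unreachable final raise.
import Mathlib
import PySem

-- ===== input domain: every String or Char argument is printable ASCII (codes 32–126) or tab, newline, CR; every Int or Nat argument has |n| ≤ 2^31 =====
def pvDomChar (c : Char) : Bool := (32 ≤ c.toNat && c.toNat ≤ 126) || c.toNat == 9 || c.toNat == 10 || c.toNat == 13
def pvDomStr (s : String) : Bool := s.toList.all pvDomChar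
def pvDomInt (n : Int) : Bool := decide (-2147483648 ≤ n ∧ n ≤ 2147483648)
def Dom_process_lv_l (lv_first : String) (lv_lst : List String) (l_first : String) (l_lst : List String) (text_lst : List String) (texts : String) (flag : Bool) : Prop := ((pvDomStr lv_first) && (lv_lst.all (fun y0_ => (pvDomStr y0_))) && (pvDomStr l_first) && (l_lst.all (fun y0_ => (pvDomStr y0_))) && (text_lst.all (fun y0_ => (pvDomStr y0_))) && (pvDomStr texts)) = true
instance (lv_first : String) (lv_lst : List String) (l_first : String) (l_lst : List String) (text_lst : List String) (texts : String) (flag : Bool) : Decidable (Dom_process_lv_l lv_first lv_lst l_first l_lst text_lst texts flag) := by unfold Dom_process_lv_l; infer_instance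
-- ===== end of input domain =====

-- B replaces A's tail recursion by one while-loop over the same state, factoring the shared
-- lv-head advance and the '##Assistant' append out of the branches (objective: simpler).
-- Both Pythons mutate text_lst in place identically; the equivalence proved is about the return value.


-- ===== PORT A =====
-- literal port of A's recursion; '##Assistant'+'\n' is constant-folded to "##Assistant\n";
-- every `[] => text_lst` arm is where Python raises IndexError (excluded by Pre_); A's final
-- `else: raise ValueError` is unreachable (lv_first = l_first or ≠ is exhaustive).
def process_lv_l (lv_first : String) (lv_lst : List String) (l_first : String) (l_lst : List String) (text_lst : List String) (texts : String) (flag : Bool) : List String :=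
  if l_lst.length = 0 ∧ lv_first = l_first then
    if flag then
      text_lst ++ [texts ++ lv_first, "##Assistant\n" ++ PySem.Str.join "" lv_lst]
    else
      text_lst ++ [texts, lv_first, "##Assistant\n" ++ PySem.Str.join "" lv_lst]
  else if PySem.Str.isIn "Show." lv_first then
    match lv_lst with
    | [] => text_lst  -- lv_lst[0]: IndexError
    | x :: rest =>
        process_lv_l x rest l_first l_lst (text_lst ++ [texts, PySem.Str.replace lv_first "Show." "##User"]) "" flag
  else if lv_first = l_first then
    match lv_lst with
    | [] => text_lst  -- lv_lst[0]: IndexError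
    | x :: rest =>
        match l_lst with
        | [] => text_lst  -- l_lst[0]: IndexError (unreachable: the first branch covers l_lst = [])
        | y :: ys =>
            if flag then process_lv_l x rest y ys text_lst (texts ++ lv_first) flag
            else process_lv_l x rest y ys (text_lst ++ [texts]) lv_first true
  else
    match lv_lst with
    | [] => text_lst  -- lv_lst[0]: IndexError
    | x :: rest =>
        if flag then process_lv_l x rest l_first l_lst (text_lst ++ [texts]) ("##Assistant\n" ++ lv_first) false
        else process_lv_l x rest l_first l_lst text_lst (texts ++ lv_first) flag
termination_by lv_lst.length
decreasing_by all_goals simp_all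

-- ===== PORT B =====
-- one iteration of Source B's while-loop body: Sum.inl = the return, Sum.inr = the updated
-- (l_first, l_lst, text_lst, texts, flag); the lv-head advance happens in the loop itself.
def pvStep (lv_first : String) (lv_lst : List String) (l_first : String) (l_lst : List String) (text_lst : List String) (texts : String) (flag : Bool) :
    (List String) ⊕ (String × List String × List String × String × Bool) :=
  if l_lst.length = 0 ∧ lv_first = l_first then
    Sum.inl ((if flag then text_lst ++ [texts ++ lv_first] else text_lst ++ [texts, lv_first])
              ++ ["##Assistant\n" ++ PySem.Str.join "" lv_lst])
  else if PySem.Str.isIn "Show." lv_first then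
    Sum.inr (l_first, l_lst, text_lst ++ [texts, PySem.Str.replace lv_first "Show." "##User"], "", flag)
  else if lv_first = l_first then
    match l_lst with
    | y :: ys =>
        if flag then Sum.inr (y, ys, text_lst, texts ++ lv_first, flag)
        else Sum.inr (y, ys, text_lst ++ [texts], lv_first, true)
    | [] => Sum.inl []  -- l_lst[0]: IndexError (unreachable: the return branch covers l_lst = [])
  else
    if flag then Sum.inr (l_first, l_lst, text_lst ++ [texts], "##Assistant\n" ++ lv_first, false)
    else Sum.inr (l_first, l_lst, text_lst, texts ++ lv_first, flag)

-- the while-True loop; fuel lv_lst.length+1 is enough since every continuing iteration pops one lv element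
def pvLoop : Nat → String → List String → String → List String → List String → String → Bool → List String
  | 0, _, _, _, _, _, _, _ => []
  | fuel + 1, lv_first, lv_lst, l_first, l_lst, text_lst, texts, flag =>
      match pvStep lv_first lv_lst l_first l_lst text_lst texts flag with
      | Sum.inl r => r
      | Sum.inr (l_first', l_lst', text_lst', texts', flag') =>
          match lv_lst with
          | x :: rest => pvLoop fuel x rest l_first' l_lst' text_lst' texts' flag'
          | [] => []  -- lv_lst[0]: IndexError

def process_lv_l_alt (lv_first : String) (lv_lst : List String) (l_first : String) (l_lst : List String) (text_lst : List String) (texts : String) (flag : Bool) : List String :=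
  pvLoop (lv_lst.length + 1) lv_first lv_lst l_first l_lst text_lst texts flag

-- ===== PRECONDITION & SPEC =====
-- Pre_ excludes exactly the inputs on which Python A raises: IndexError when lv_lst is exhausted
-- before the stop condition (l_lst empty and current lv head = l head) is met. pvOk tracks only
-- the two list pointers (which branch fires and when l advances) — the minimal closed description
-- of the control flow; it computes none of the outputs.
def pvOk : List String → List String → Bool
  | x :: rest, y :: ys =>
    if ys.length = 0 ∧ x = y then true
    else if PySem.Str.isIn "Show." x then pvOk rest (y :: ys)
    else if x = y then pvOk rest ys
    else pvOk rest (y :: ys)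
  | _, _ => false

def Pre_process_lv_l (lv_first : String) (lv_lst : List String) (l_first : String) (l_lst : List String) (text_lst : List String) (texts : String) (flag : Bool) : Prop :=
  pvOk (lv_first :: lv_lst) (l_first :: l_lst) = true
instance (lv_first : String) (lv_lst : List String) (l_first : String) (l_lst : List String) (text_lst : List String) (texts : String) (flag : Bool) : Decidable (Pre_process_lv_l lv_first lv_lst l_first l_lst text_lst texts flag) := by unfold Pre_process_lv_l; infer_instance

def pvWitness_process_lv_l : String × List String × String × List String × List String × String × Bool :=
  ("b", ["Show.x", "a"], "b", ["a"], ["t"], "s", false)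

def Spec_process_lv_l (lv_first : String) (lv_lst : List String) (l_first : String) (l_lst : List String) (text_lst : List String) (texts : String) (flag : Bool) (out : List String) : Prop := out = process_lv_l_alt lv_first lv_lst l_first l_lst text_lst texts flag
instance (lv_first : String) (lv_lst : List String) (l_first : String) (l_lst : List String) (text_lst : List String) (texts : String) (flag : Bool) (out : List String) : Decidable (Spec_process_lv_l lv_first lv_lst l_first l_lst text_lst texts flag out) := by unfold Spec_process_lv_l; infer_instance

-- ===== CLAIM (what is proved, stated in full; the proofs are below) =====
def Claim_equal_process_lv_l : Prop := ∀ (lv_first : String) (lv_lst : List String) (l_first : String) (l_lst : List String) (text_lst : List String) (texts : String) (flag : Bool), Dom_process_lv_l lv_first lv_lst l_first l_lst text_lst texts flag → Pre_process_lv_l lv_first lv_lst l_first l_lst text_lst texts flag → Spec_process_lv_l lv_first lv_lst l_first l_lst text_lst texts flag (process_lv_l lv_first lv_lst l_first l_lst text_lst texts flag)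

-- ===== LEMMAS AND PROOFS =====
lemma pv_main : ∀ (lv_lst : List String) (lv_first l_first : String) (l_lst text_lst : List String) (texts : String) (flag : Bool),
    pvOk (lv_first :: lv_lst) (l_first :: l_lst) = true →
    process_lv_l lv_first lv_lst l_first l_lst text_lst texts flag
      = pvLoop (lv_lst.length + 1) lv_first lv_lst l_first l_lst text_lst texts flag := by
  intro lv_lst
  induction lv_lst with
  | nil =>
    intro lv_first l_first l_lst text_lst texts flag h
    rw [pvOk] at h
    split_ifs at h with h1 h2 h3
    · -- terminal branch
      rw [process_lv_l.eq_def, pvLoop, pvStep.eq_def]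
      simp only [if_pos h1]
      cases flag <;> simp
    all_goals simp [pvOk] at h
  | cons x rest ih =>
    intro lv_first l_first l_lst text_lst texts flag h
    rw [pvOk] at h
    split_ifs at h with h1 h2 h3
    · -- terminal branch
      rw [process_lv_l.eq_def, pvLoop, pvStep.eq_def]
      simp only [if_pos h1]
      cases flag <;> simp
    · -- Show. branch
      rw [process_lv_l.eq_def, pvLoop, pvStep.eq_def]
      simp only [if_neg h1, if_pos h2]
      exact ih x l_first l_lst _ _ flag h
    · -- == branch: l_lst is nonempty here
      cases l_lst with
      | nil => exact absurd ⟨rfl, h3⟩ h1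
      | cons y ys =>
        rw [process_lv_l.eq_def, pvLoop, pvStep.eq_def]
        simp only [if_neg h1, if_neg h2, if_pos h3]
        cases flag <;> exact ih x y ys _ _ _ h
    · -- != branch
      rw [process_lv_l.eq_def, pvLoop, pvStep.eq_def]
      simp only [if_neg h1, if_neg h2, if_neg h3]
      cases flag <;> exact ih x l_first l_lst _ _ _ h

-- ===== VERDICT (by name: the statement is the Claim_ definition above) =====
theorem process_lv_l_spec : Claim_equal_process_lv_l := by
  intro lv_first lv_lst l_first l_lst text_lst texts flag _ hpre
  unfold Spec_process_lv_l process_lv_l_alt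
  exact pv_main lv_lst lv_first l_first l_lst text_lst texts flag hpre
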